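-- pv_equiv track=rewrite | github.com/Burrie/AI-Gem-Hunter | gem_hunter.py | convert_DNF_to_CNF
-- ===== SOURCE A (Python) =====
-- def convert_DNF_to_CNF(current_DNF_clause: int, DNF_array: list):
--     CNF_array = []
--
--     if current_DNF_clause < len(DNF_array) - 1:
--         for literal in DNF_array[current_DNF_clause]:
--             CNF_clauses = convert_DNF_to_CNF(current_DNF_clause= current_DNF_clause+ 1, DNF_array= DNF_array)
--             for clause in CNF_clauses:
--                 if(clause.__contains__(-literal)): #Literal Or negation of it -> Give 1 -> 1 Or 1/0 -> Give 1
--                     continue #Because of CNF, we can ignore the clause always gives 1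
--                 if (clause.__contains__(literal) == False): #Just add the literal to the clause only when it doesn't appear in the clause.
--                     clause.append(literal)
--                 CNF_array.append(clause)
--     else:
--         for literal in DNF_array[current_DNF_clause]:
--             clause = [literal]
--             CNF_array.append(clause) #2D array
--
--     return CNF_array
-- ===== SOURCE B (Python) =====
-- def convert_DNF_to_CNF(current_DNF_clause: int, DNF_array: list):
--     if current_DNF_clause >= len(DNF_array) - 1:
--         return [[lit] for lit in DNF_array[current_DNF_clause]]
--     result = [[lit] for lit in DNF_array[-1]]
--     for i in range(len(DNF_array) - 2, current_DNF_clause - 1, -1):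
--         new_result = []
--         for lit in DNF_array[i]:
--             for clause in result:
--                 c = clause.copy()
--                 if -lit in c:
--                     continue
--                 if lit not in c:
--                     c.append(lit)
--                 new_result.append(c)
--         result = new_result
--     return result
-- ===== Notes on version B (the rewrite author's own statement) =====
-- stated objective: faster
-- what changed: Replaced A's top-down recursion, which recomputes the entire tail conversion once per literal (exponential recomputation), by a single bottom-up fold over the clauses that builds each distribution layer exactly once.
import Mathlib
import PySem

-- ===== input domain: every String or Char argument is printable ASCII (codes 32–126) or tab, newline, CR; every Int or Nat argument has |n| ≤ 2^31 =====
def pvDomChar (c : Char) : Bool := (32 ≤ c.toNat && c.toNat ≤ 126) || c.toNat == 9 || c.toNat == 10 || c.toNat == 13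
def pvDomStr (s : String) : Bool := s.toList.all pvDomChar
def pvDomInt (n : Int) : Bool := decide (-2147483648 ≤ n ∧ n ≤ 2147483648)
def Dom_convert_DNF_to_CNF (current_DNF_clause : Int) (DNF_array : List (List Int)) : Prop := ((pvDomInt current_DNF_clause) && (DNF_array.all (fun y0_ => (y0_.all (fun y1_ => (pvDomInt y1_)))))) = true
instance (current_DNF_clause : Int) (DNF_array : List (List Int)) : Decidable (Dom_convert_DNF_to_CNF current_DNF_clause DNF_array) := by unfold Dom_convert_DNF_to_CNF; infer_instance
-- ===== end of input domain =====

-- B replaces A's exponential recursion (which recomputes the whole tail per literal) by one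
-- bottom-up fold over the clauses, computing each distribution layer exactly once: faster.

-- ===== PORT A =====
-- literal transliteration of the recursive Python A; pyGetD … [] is only read under Pre_ (index in range)
def convert_DNF_to_CNF (current_DNF_clause : Int) (DNF_array : List (List Int)) : List (List Int) :=
  if _h : current_DNF_clause < (DNF_array.length : Int) - 1 then
    (PySem.List.pyGetD DNF_array current_DNF_clause []).foldl
      (fun CNF_array literal =>
        let CNF_clauses := convert_DNF_to_CNF (current_DNF_clause + 1) DNF_array
        CNF_clauses.foldl
          (fun acc clause =>
            if clause.contains (-literal) then acc
            else if clause.contains literal then acc ++ [clause]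
            else acc ++ [clause ++ [literal]])
          CNF_array)
      []
  else
    (PySem.List.pyGetD DNF_array current_DNF_clause []).foldl
      (fun CNF_array literal => CNF_array ++ [[literal]]) []
termination_by ((DNF_array.length : Int) - 1 - current_DNF_clause).toNat
decreasing_by omega

-- ===== PORT B =====
def convert_DNF_to_CNF_alt (current_DNF_clause : Int) (DNF_array : List (List Int)) : List (List Int) :=
  if current_DNF_clause ≥ (DNF_array.length : Int) - 1 then
    (PySem.List.pyGetD DNF_array current_DNF_clause []).map (fun lit => [lit])
  else
    (PySem.List.pyRange ((DNF_array.length : Int) - 2) (current_DNF_clause - 1) (-1)).foldl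
      (fun result i =>
        (PySem.List.pyGetD DNF_array i []).foldl
          (fun new_result lit =>
            result.foldl
              (fun nr clause =>
                if clause.contains (-lit) then nr
                else if clause.contains lit then nr ++ [clause]
                else nr ++ [clause ++ [lit]])
              new_result)
          [])
      ((PySem.List.pyGetD DNF_array (-1) []).map (fun lit => [lit]))

-- ===== PRECONDITION & SPEC =====
-- Pre_ excludes exactly the out-of-range indices, on which the Python A raises IndexError.
def Pre_convert_DNF_to_CNF (current_DNF_clause : Int) (DNF_array : List (List Int)) : Prop :=
  -(DNF_array.length : Int) ≤ current_DNF_clause ∧ current_DNF_clause < (DNF_array.length : Int)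
instance (current_DNF_clause : Int) (DNF_array : List (List Int)) : Decidable (Pre_convert_DNF_to_CNF current_DNF_clause DNF_array) := by unfold Pre_convert_DNF_to_CNF; infer_instance

def pvWitness_convert_DNF_to_CNF : Int × List (List Int) := (0, [[1, 2], [-2, 3]])

def Spec_convert_DNF_to_CNF (current_DNF_clause : Int) (DNF_array : List (List Int)) (out : List (List Int)) : Prop := out = convert_DNF_to_CNF_alt current_DNF_clause DNF_array
instance (current_DNF_clause : Int) (DNF_array : List (List Int)) (out : List (List Int)) : Decidable (Spec_convert_DNF_to_CNF current_DNF_clause DNF_array out) := by unfold Spec_convert_DNF_to_CNF; infer_instance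

-- ===== CLAIM (what is proved, stated in full; the proofs are below) =====
def Claim_equal_convert_DNF_to_CNF : Prop := ∀ (current_DNF_clause : Int) (DNF_array : List (List Int)), Dom_convert_DNF_to_CNF current_DNF_clause DNF_array → Pre_convert_DNF_to_CNF current_DNF_clause DNF_array → Spec_convert_DNF_to_CNF current_DNF_clause DNF_array (convert_DNF_to_CNF current_DNF_clause DNF_array)

-- ===== LEMMAS AND PROOFS =====

-- the B loop with its lower bound c, as a function of c
def pvBloop (arr : List (List Int)) (c : Int) : List (List Int) :=
  (PySem.List.pyRange ((arr.length : Int) - 2) (c - 1) (-1)).foldl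
    (fun result i =>
      (PySem.List.pyGetD arr i []).foldl
        (fun new_result lit =>
          result.foldl
            (fun nr clause =>
              if clause.contains (-lit) then nr
              else if clause.contains lit then nr ++ [clause]
              else nr ++ [clause ++ [lit]])
            new_result)
        [])
    ((PySem.List.pyGetD arr (-1) []).map (fun lit => [lit]))

lemma pvRange_snoc (a b : Int) (h : b ≤ a) :
    PySem.List.pyRange a (b - 1) (-1) = PySem.List.pyRange a b (-1) ++ [b] := by
  rw [PySem.List.pyRange_neg_one_eq_reverse, PySem.List.pyRange_neg_one_eq_reverse]
  have hb : b - 1 + 1 = b := by ring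
  rw [hb, PySem.List.pyRange_one_cons (by omega : b < a + 1)]
  simp

lemma pvGetD_neg_one (arr : List (List Int)) (h : 1 ≤ arr.length) :
    PySem.List.pyGetD arr (-1) [] = PySem.List.pyGetD arr ((arr.length : Int) - 1) [] := by
  simp [PySem.List.pyGetD, PySem.List.pyGet?, PySem.List.pyIdx?, h]

lemma pvKey (arr : List (List Int)) (k : Nat) :
    ∀ c : Int, -(arr.length : Int) ≤ c → c = (arr.length : Int) - 1 - k →
      convert_DNF_to_CNF c arr = pvBloop arr c := by
  induction k with
  | zero =>
      intro c hlo hc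
      have hlen : 1 ≤ arr.length := by omega
      have hc' : c = (arr.length : Int) - 1 := by omega
      subst hc'
      rw [convert_DNF_to_CNF]
      rw [dif_neg (by omega)]
      unfold pvBloop
      rw [PySem.List.pyRange_neg_one_eq_nil (by omega)]
      simp only [List.foldl_nil]
      rw [pvGetD_neg_one arr hlen]
      simpa using PySem.List.foldl_append_singleton_eq_map
        (fun lit : Int => ([lit] : List Int)) (PySem.List.pyGetD arr ((arr.length : Int) - 1) []) []
  | succ k ih =>
      intro c hlo hc
      have hlt : c < (arr.length : Int) - 1 := by omega
      have hrec : convert_DNF_to_CNF (c + 1) arr = pvBloop arr (c + 1) :=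
        ih (c + 1) (by omega) (by omega)
      rw [convert_DNF_to_CNF, dif_pos hlt]
      unfold pvBloop
      rw [pvRange_snoc _ _ (by omega : c ≤ (arr.length : Int) - 2), List.foldl_append]
      have hprev :
          (PySem.List.pyRange ((arr.length : Int) - 2) c (-1)).foldl
            (fun result i =>
              (PySem.List.pyGetD arr i []).foldl
                (fun new_result lit =>
                  result.foldl
                    (fun nr clause =>
                      if clause.contains (-lit) then nr
                      else if clause.contains lit then nr ++ [clause]
                      else nr ++ [clause ++ [lit]])
                    new_result)
                [])
            ((PySem.List.pyGetD arr (-1) []).map (fun lit => [lit]))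
          = pvBloop arr (c + 1) := by
        unfold pvBloop
        have h1 : c + 1 - 1 = c := by ring
        rw [h1]
      rw [hprev, ← hrec]
      simp only [List.foldl_cons, List.foldl_nil]

lemma pvAlt_eq_Bloop (arr : List (List Int)) (c : Int)
    (hlo : -(arr.length : Int) ≤ c) (hhi : c < (arr.length : Int)) :
    convert_DNF_to_CNF_alt c arr = pvBloop arr c := by
  by_cases h : c ≥ (arr.length : Int) - 1
  · have hc : c = (arr.length : Int) - 1 := by omega
    have hlen : 1 ≤ arr.length := by omega
    unfold convert_DNF_to_CNF_alt pvBloop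
    rw [if_pos h, PySem.List.pyRange_neg_one_eq_nil (by omega)]
    simp only [List.foldl_nil]
    rw [pvGetD_neg_one arr hlen, hc]
  · unfold convert_DNF_to_CNF_alt pvBloop
    rw [if_neg h]

-- ===== VERDICT (by name: the statement is the Claim_ definition above) =====
theorem convert_DNF_to_CNF_spec : Claim_equal_convert_DNF_to_CNF := by
  intro c arr _hd hpre
  obtain ⟨hlo, hhi⟩ := hpre
  unfold Spec_convert_DNF_to_CNF
  rw [pvAlt_eq_Bloop arr c hlo hhi]
  exact pvKey arr ((arr.length : Int) - 1 - c).toNat c hlo (by omega)
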